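-- pv_equiv track=rewrite | github.com/stephanedenis/PaniniFS-Research | tech/corpus_collector.py | categorize_domain
-- ===== SOURCE A (Python) =====
-- from typing import List, Dict, Any, Optional
--
-- def categorize_domain(categories: List[str]) -> str:
--     """Categorize paper by domain based on ArXiv categories"""
--     if any(cat.startswith('math.') for cat in categories):
--         return 'mathematics'
--     elif any(cat.startswith('cs.') for cat in categories):
--         return 'computer_science'
--     elif any(cat.startswith('physics.') or cat == 'quant-ph' for cat in categories):
--         return 'physics'
--     elif any(cat.startswith('q-bio.') for cat in categories):
--         return 'biology'
--     elif any(cat.startswith('cond-mat.') for cat in categories):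
--         return 'condensed_matter'
--     else:
--         return 'interdisciplinary'
-- ===== SOURCE B (Python) =====
-- _NAMES = ['mathematics', 'computer_science', 'physics', 'biology',
--           'condensed_matter', 'interdisciplinary']
--
--
-- def _rank(cat):
--     if cat.startswith('math.'):
--         return 0
--     if cat.startswith('cs.'):
--         return 1
--     if cat.startswith('physics.') or cat == 'quant-ph':
--         return 2
--     if cat.startswith('q-bio.'):
--         return 3
--     if cat.startswith('cond-mat.'):
--         return 4
--     return 5
--
--
-- def categorize_domain(categories):
--     """Categorize paper by domain based on ArXiv categories"""
--     best = 5
--     for cat in categories: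
--         r = _rank(cat)
--         if r < best:
--             best = r
--     return _NAMES[best]
-- ===== Notes on version B (the rewrite author's own statement) =====
-- stated objective: alternative
-- what changed: Replaces five separate any(...) scans over the list (one per domain, in priority order) by a single pass over categories that ranks each category once and keeps the minimum rank, then maps the rank to its domain name.
import Mathlib
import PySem

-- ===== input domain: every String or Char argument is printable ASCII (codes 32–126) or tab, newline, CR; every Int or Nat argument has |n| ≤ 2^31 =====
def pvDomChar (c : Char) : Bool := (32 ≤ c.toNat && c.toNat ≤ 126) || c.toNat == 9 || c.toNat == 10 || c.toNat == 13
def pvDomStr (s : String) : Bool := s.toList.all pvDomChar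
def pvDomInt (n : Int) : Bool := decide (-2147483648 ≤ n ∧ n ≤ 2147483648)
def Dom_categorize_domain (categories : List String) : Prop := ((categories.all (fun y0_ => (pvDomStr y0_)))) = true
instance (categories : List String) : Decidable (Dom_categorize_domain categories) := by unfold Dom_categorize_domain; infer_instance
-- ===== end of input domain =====

-- B replaces A's five priority-ordered any(...) scans by a single pass over the categories
-- keeping the minimum priority rank, then one table lookup (objective: alternative decomposition).

-- ===== PORT A =====
def categorize_domain (categories : List String) : String :=
  if categories.any (fun cat => PySem.Str.startswith cat "math.") then "mathematics"
  else if categories.any (fun cat => PySem.Str.startswith cat "cs.") then "computer_science"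
  else if categories.any (fun cat => PySem.Str.startswith cat "physics." || cat == "quant-ph") then "physics"
  else if categories.any (fun cat => PySem.Str.startswith cat "q-bio.") then "biology"
  else if categories.any (fun cat => PySem.Str.startswith cat "cond-mat.") then "condensed_matter"
  else "interdisciplinary"

-- ===== PORT B =====
-- B: one pass over the categories keeping the minimum priority rank, then one table lookup.
def cdNames : List String :=
  ["mathematics", "computer_science", "physics", "biology", "condensed_matter", "interdisciplinary"]

def cdRank (cat : String) : Nat :=
  if PySem.Str.startswith cat "math." then 0
  else if PySem.Str.startswith cat "cs." then 1
  else if PySem.Str.startswith cat "physics." || cat == "quant-ph" then 2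
  else if PySem.Str.startswith cat "q-bio." then 3
  else if PySem.Str.startswith cat "cond-mat." then 4
  else 5

def categorize_domain_alt (categories : List String) : String :=
  let best := categories.foldl (fun b cat => let r := cdRank cat; if r < b then r else b) 5
  cdNames.getD best "interdisciplinary"

-- ===== PRECONDITION & SPEC =====
def Spec_categorize_domain (categories : List String) (out : String) : Prop := out = categorize_domain_alt categories
instance (categories : List String) (out : String) : Decidable (Spec_categorize_domain categories out) := by unfold Spec_categorize_domain; infer_instance

-- ===== CLAIM (what is proved, stated in full; the proofs are below) =====
def Claim_equal_categorize_domain : Prop := ∀ (categories : List String), Dom_categorize_domain categories → Spec_categorize_domain categories (categorize_domain categories)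

-- ===== LEMMAS AND PROOFS =====
theorem cdRank_le (c : String) : cdRank c ≤ 5 := by
  unfold cdRank; split_ifs <;> omega

theorem cdFold_acc (cs : List String) : ∀ a : Nat, a ≤ 5 →
    cs.foldl (fun b cat => let r := cdRank cat; if r < b then r else b) a
      = min a (cs.foldl (fun b cat => let r := cdRank cat; if r < b then r else b) 5) := by
  induction cs with
  | nil => intro a ha; simp [List.foldl]; omega
  | cons c cs ih =>
    intro a ha
    have h5 := cdRank_le c
    simp only [List.foldl]
    rw [ih (if cdRank c < a then cdRank c else a) (by split_ifs <;> omega),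
        ih (if cdRank c < 5 then cdRank c else 5) (by split_ifs <;> omega)]
    split_ifs <;> omega

theorem cdChainMin (b0 b1 b2 b3 b4 a0 a1 a2 a3 a4 : Bool) :
    min
      (if (if b0 then 0 else if b1 then 1 else if b2 then 2 else if b3 then 3 else if b4 then 4 else 5) < 5
        then (if b0 then 0 else if b1 then 1 else if b2 then 2 else if b3 then 3 else if b4 then 4 else 5)
        else 5)
      (if a0 then 0 else if a1 then 1 else if a2 then 2 else if a3 then 3 else if a4 then 4 else 5)
      = (if (b0 || a0) then 0 else if (b1 || a1) then 1 else if (b2 || a2) then 2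
        else if (b3 || a3) then 3 else if (b4 || a4) then 4 else 5) := by
  revert b0 b1 b2 b3 b4 a0 a1 a2 a3 a4
  decide

theorem cdBest_eq (cs : List String) :
    cs.foldl (fun b cat => let r := cdRank cat; if r < b then r else b) 5
      = (if cs.any (fun cat => PySem.Str.startswith cat "math.") then 0
        else if cs.any (fun cat => PySem.Str.startswith cat "cs.") then 1
        else if cs.any (fun cat => PySem.Str.startswith cat "physics." || cat == "quant-ph") then 2
        else if cs.any (fun cat => PySem.Str.startswith cat "q-bio.") then 3
        else if cs.any (fun cat => PySem.Str.startswith cat "cond-mat.") then 4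
        else 5) := by
  induction cs with
  | nil => simp [List.foldl]
  | cons c cs ih =>
    have h5 := cdRank_le c
    simp only [List.foldl, List.any_cons]
    rw [cdFold_acc cs (if cdRank c < 5 then cdRank c else 5) (by split_ifs <;> omega), ih]
    unfold cdRank
    exact cdChainMin _ _ _ _ _ _ _ _ _ _

-- ===== VERDICT (by name: the statement is the Claim_ definition above) =====
theorem categorize_domain_spec : Claim_equal_categorize_domain := by
  intro categories _
  unfold Spec_categorize_domain categorize_domain categorize_domain_alt
  rw [cdBest_eq]
  split_ifs <;> simp [cdNames]
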